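-- pv_equiv track=rewrite | github.com/service-GCT-EMS/pyetl | pyetl/formats/mdbaccess.py | ihmtablelist
-- ===== SOURCE A (Python) =====
-- def ihmtablelist(liste):
--     """retourne une liste hierarchique de niveaux classe"""
--     schemas = dict()
--     for i in liste:
--         nomschema, nomtable, commentaire, nb_enreg = i
--         if nomschema not in schemas:
--             schemas[nomschema] = dict()
--         schemas[nomschema][nomtable] = (commentaire, nb_enreg)
--     liste = []
--     for i in sorted(schemas):
--         valeur = (
--             i + ":<" + ",".join([j + ":" + str(schemas[i][j]) for j in sorted(schemas[i])]) + ">"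
--         )
--         liste.append(valeur)
--     return "<" + ",".join(liste) + ">"
-- ===== SOURCE B (Python) =====
-- def ihmtablelist(liste):
--     """retourne une liste hierarchique de niveaux classe"""
--     segs = []
--     for schema in sorted({i[0] for i in liste}):
--         rows = [(t, c, n) for s, t, c, n in liste if s == schema]
--         parts = []
--         for table in sorted({r[0] for r in rows}):
--             val = None
--             for t, c, n in rows:
--                 if t == table:
--                     val = (c, n)
--             parts.append(table + ":" + str(val))
--         segs.append(schema + ":<" + ",".join(parts) + ">")
--     return "<" + ",".join(segs) + ">"
-- ===== Notes on version B (the rewrite author's own statement) =====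
-- stated objective: alternative
-- what changed: B drops the nested-dict accumulator entirely: it sorts the deduplicated schema names, filters the rows per schema, sorts the deduplicated table names per group, and finds each table's last (comment, nb) value by a direct rescan of the group's rows.
import Mathlib
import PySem

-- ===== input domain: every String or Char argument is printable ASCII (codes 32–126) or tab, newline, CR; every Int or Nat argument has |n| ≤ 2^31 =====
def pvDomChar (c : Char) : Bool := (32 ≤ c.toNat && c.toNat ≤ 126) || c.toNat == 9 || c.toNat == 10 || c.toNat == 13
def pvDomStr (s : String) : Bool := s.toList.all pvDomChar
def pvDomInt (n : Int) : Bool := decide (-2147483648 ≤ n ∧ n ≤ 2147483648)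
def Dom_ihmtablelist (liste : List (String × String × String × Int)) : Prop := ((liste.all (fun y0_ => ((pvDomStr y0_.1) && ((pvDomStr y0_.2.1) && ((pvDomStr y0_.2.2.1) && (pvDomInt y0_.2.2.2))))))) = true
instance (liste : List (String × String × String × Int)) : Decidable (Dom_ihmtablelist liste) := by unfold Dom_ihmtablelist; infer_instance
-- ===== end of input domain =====

-- B replaces A's nested-dict accumulator by sorted deduplicated key lists plus per-group
-- filtering and a last-match rescan (objective: alternative decomposition, same results).

-- Shared formatting primitive: Python's str((commentaire, nb_enreg)) — repr of the string
-- (quote choice and escaping, exact on the printable-ASCII + tab/newline/CR domain) and str of the int.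
def pvReprChars (cs : List Char) : List Char :=
  let q : Char := if '\'' ∈ cs ∧ '"' ∉ cs then '"' else '\''
  [q] ++ (cs.flatMap (fun c =>
    if c = '\\' then ['\\', '\\']
    else if c = q then ['\\', q]
    else if c = '\t' then ['\\', 't']
    else if c = '\n' then ['\\', 'n']
    else if c = '\r' then ['\\', 'r']
    else [c])) ++ [q]

def pvStrTuple (p : String × Int) : String :=
  "(" ++ String.ofList (pvReprChars p.1.toList) ++ ", " ++ PySem.Int.toStr p.2 ++ ")"

-- ===== PORT A =====
-- A: one pass building a dict of dicts (schema → table → (comment, nb), last write wins),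
-- then formats sorted(schemas) / sorted(schemas[i]).  getD's defaults are never used: every
-- looked-up key is a key of the dict.
def ihmtablelist (liste : List (String × String × String × Int)) : String :=
  let schemas : PySem.Dict String (PySem.Dict String (String × Int)) :=
    liste.foldl (fun d i =>
      let d1 := if d.contains i.1 then d else d.insert i.1 PySem.Dict.empty
      d1.insert i.1 ((d1.getD i.1 PySem.Dict.empty).insert i.2.1 i.2.2)) PySem.Dict.empty
  let segs : List String :=
    (PySem.List.sorted schemas.keys (fun x => x) false).foldl (fun acc i =>
      acc ++ [i ++ ":<" ++
        PySem.Str.join "," ((PySem.List.sorted (schemas.getD i PySem.Dict.empty).keys (fun x => x) false).map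
          (fun j => j ++ ":" ++ pvStrTuple ((schemas.getD i PySem.Dict.empty).getD j ("", 0)))) ++ ">"]) []
  "<" ++ PySem.Str.join "," segs ++ ">"

-- ===== PORT B =====
-- B: sorted deduplicated schemas; per schema filter the rows, sorted deduplicated tables,
-- and per table a last-match scan (val is never none at use: the table came from rows).
def ihmtablelist_alt (liste : List (String × String × String × Int)) : String :=
  let segs : List String :=
    (PySem.List.sorted (PySem.Set.ofList (liste.map (·.1))) (fun x => x) false).map (fun schema =>
      let rows : List (String × String × Int) := (liste.filter (fun r => r.1 == schema)).map (·.2)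
      let parts : List String :=
        (PySem.List.sorted (PySem.Set.ofList (rows.map (·.1))) (fun x => x) false).map (fun table =>
          let val : Option (String × Int) :=
            rows.foldl (fun acc r => if r.1 == table then some r.2 else acc) none
          table ++ ":" ++ pvStrTuple (val.getD ("", 0)))
      schema ++ ":<" ++ PySem.Str.join "," parts ++ ">")
  "<" ++ PySem.Str.join "," segs ++ ">"

-- ===== PRECONDITION & SPEC =====
def Spec_ihmtablelist (liste : List (String × String × String × Int)) (out : String) : Prop := out = ihmtablelist_alt liste
instance (liste : List (String × String × String × Int)) (out : String) : Decidable (Spec_ihmtablelist liste out) := by unfold Spec_ihmtablelist; infer_instance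

-- ===== CLAIM (what is proved, stated in full; the proofs are below) =====
def Claim_equal_ihmtablelist : Prop := ∀ (liste : List (String × String × String × Int)), Dom_ihmtablelist liste → Spec_ihmtablelist liste (ihmtablelist liste)

-- ===== LEMMAS AND PROOFS =====

-- A's "setdefault then assign" step is one insert of the updated inner dict.
theorem pv_step_eq (d : PySem.Dict String (PySem.Dict String (String × Int)))
    (i : String × String × String × Int) :
    (let d1 := if d.contains i.1 then d else d.insert i.1 PySem.Dict.empty
     d1.insert i.1 ((d1.getD i.1 PySem.Dict.empty).insert i.2.1 i.2.2)) =
    d.insert i.1 ((d.getD i.1 PySem.Dict.empty).insert i.2.1 i.2.2) := by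
  by_cases h : d.contains i.1
  · simp [h]
  · rw [PySem.Dict.getD_of_not_contains d PySem.Dict.empty (by simp [h])]
    simp [h, PySem.Dict.insert_insert_self, PySem.Dict.getD_insert_self]

-- Looking up one schema in A's dict-of-dicts build = the inner-insert fold over that schema's rows.
theorem pv_getD_build (l : List (String × String × String × Int))
    (d : PySem.Dict String (PySem.Dict String (String × Int))) (s : String) :
    (l.foldl (fun d i => d.insert i.1 ((d.getD i.1 PySem.Dict.empty).insert i.2.1 i.2.2)) d).getD s PySem.Dict.empty =
    ((l.filter (fun r => r.1 == s)).map (·.2)).foldl (fun e r => e.insert r.1 r.2)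
      (d.getD s PySem.Dict.empty) := by
  induction l generalizing d with
  | nil => simp
  | cons a t ih =>
    simp only [List.foldl_cons, List.filter_cons]
    rw [ih]
    by_cases h : a.1 = s
    · simp [h, PySem.Dict.getD_insert_self]
    · rw [PySem.Dict.getD_insert_of_ne _ _ _ (fun hs => h hs.symm)]
      simp [h]

-- An insert fold looked up at t is the last value written at t (B's rescan loop).
theorem pv_get?_foldl_insert {κ ν : Type} [BEq κ] [LawfulBEq κ]
    (rows : List (κ × ν)) (d : PySem.Dict κ ν) (t : κ) :
    (rows.foldl (fun e r => e.insert r.1 r.2) d).get? t =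
    rows.foldl (fun acc r => if r.1 == t then some r.2 else acc) (d.get? t) := by
  induction rows generalizing d with
  | nil => rfl
  | cons a l ih =>
    simp only [List.foldl_cons]
    rw [ih]
    by_cases h : a.1 = t
    · simp [h, PySem.Dict.get?_insert_self]
    · rw [PySem.Dict.get?_insert_of_ne _ _ (fun hs => h hs.symm)]
      simp [h]

-- ===== VERDICT (by name: the statement is the Claim_ definition above) =====
theorem ihmtablelist_spec : Claim_equal_ihmtablelist := by
  intro liste _
  unfold Spec_ihmtablelist ihmtablelist ihmtablelist_alt
  dsimp only
  simp only [pv_step_eq]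
  rw [PySem.List.foldl_append_singleton_eq_map, List.nil_append,
    PySem.Dict.keys_foldl_insert_key liste (fun x => x.1)
      (fun d x => (d.getD x.1 PySem.Dict.empty).insert x.2.1 x.2.2) PySem.Dict.empty]
  have hupd : PySem.Set.update (PySem.Dict.empty (κ := String) (ν := PySem.Dict String (String × Int))).keys (liste.map (fun x => x.1)) = PySem.Set.ofList (liste.map (fun x => x.1)) := by
    rw [PySem.Set.ofList_eq_foldl]; rfl
  rw [hupd]
  have hmap : ∀ i : String,
      (fun i => i ++ ":<" ++ PySem.Str.join "," ((PySem.List.sorted ((liste.foldl (fun d i => d.insert i.1 ((d.getD i.1 PySem.Dict.empty).insert i.2.1 i.2.2)) PySem.Dict.empty).getD i PySem.Dict.empty).keys (fun x => x) false).map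
          (fun j => j ++ ":" ++ pvStrTuple (((liste.foldl (fun d i => d.insert i.1 ((d.getD i.1 PySem.Dict.empty).insert i.2.1 i.2.2)) PySem.Dict.empty).getD i PySem.Dict.empty).getD j ("", 0)))) ++ ">") i =
      (fun schema =>
        schema ++ ":<" ++ PySem.Str.join "," ((PySem.List.sorted (PySem.Set.ofList (((liste.filter (fun r => r.1 == schema)).map (·.2)).map (·.1))) (fun x => x) false).map
          (fun table => table ++ ":" ++ pvStrTuple ((((liste.filter (fun r => r.1 == schema)).map (·.2)).foldl (fun acc r => if r.1 == table then some r.2 else acc) none).getD ("", 0)))) ++ ">") i := by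
    intro i
    dsimp only
    have hDi : (liste.foldl (fun d i => d.insert i.1 ((d.getD i.1 PySem.Dict.empty).insert i.2.1 i.2.2)) PySem.Dict.empty).getD i PySem.Dict.empty =
        ((liste.filter (fun r => r.1 == i)).map (·.2)).foldl (fun e r => e.insert r.1 r.2) PySem.Dict.empty := by
      rw [pv_getD_build]
      rw [PySem.Dict.getD_of_not_contains _ _ (by simp)]
    rw [hDi, PySem.Dict.keys_foldl_insert_key ((liste.filter (fun r => r.1 == i)).map (·.2)) (fun (r : String × String × Int) => r.1) (fun (_ : PySem.Dict String (String × Int)) (r : String × String × Int) => r.2) PySem.Dict.empty]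
    have hupd2 : PySem.Set.update (PySem.Dict.empty (κ := String) (ν := String × Int)).keys (((liste.filter (fun r => r.1 == i)).map (·.2)).map (fun r => r.1)) = PySem.Set.ofList (((liste.filter (fun r => r.1 == i)).map (·.2)).map (·.1)) := by
      rw [PySem.Set.ofList_eq_foldl]; rfl
    rw [hupd2]
    have hval : ∀ j : String,
        (((liste.filter (fun r => r.1 == i)).map (·.2)).foldl (fun e r => e.insert r.1 r.2) PySem.Dict.empty).getD j ("", 0) =
        (((liste.filter (fun r => r.1 == i)).map (·.2)).foldl (fun acc r => if r.1 == j then some r.2 else acc) none).getD ("", 0) := by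
      intro j
      rw [PySem.Dict.getD_eq_get?_getD, pv_get?_foldl_insert]
      rfl
    simp only [hval]
  rw [List.map_congr_left (fun i _ => hmap i)]
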